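-- pv_equiv track=rewrite | github.com/jasonmayday/LeetCode | leetcode_cup/1_easy/LCP_51_烹饪料理.py | perfectMenu
-- ===== SOURCE A (Python) =====
-- from typing import List
--
-- def perfectMenu(materials: List[int], cookbooks: List[List[int]], attribute: List[List[int]], limit: int) -> int:
--     n = len(cookbooks)
--     target = -1
--     for i in range(1, 1 << n):  # 所有可能的料理方案
--         hungry = 0
--         delicous = 0
--         s = materials
--         for j in range(0, n):
--             if i & (1 << j) != 0:   # 判断 i 方案有没有 j 这个料理
--                 hungry += attribute[j][1]
--                 delicous += attribute[j][0]
--                 s = [x - y for x, y in zip(s, cookbooks[j])]    # 记录一下材料剩余数量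
--         if hungry >= limit and min(s) >= 0:
--             target = max(delicous, target)
--     return target
-- ===== SOURCE B (Python) =====
-- from typing import List
--
-- def perfectMenu(materials: List[int], cookbooks: List[List[int]], attribute: List[List[int]], limit: int) -> int:
--     best = -1
--
--     def dfs(items, s, hungry, delicious, chosen):
--         nonlocal best
--         if not items:
--             if chosen and hungry >= limit and min(s) >= 0:
--                 best = max(best, delicious)
--             return
--         (cb, at), rest = items[0], items[1:]
--         dfs(rest, s, hungry, delicious, chosen)
--         dfs(rest, [x - y for x, y in zip(s, cb)],
--             hungry + at[1], delicious + at[0], True)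
--
--     dfs(list(zip(cookbooks, attribute)), materials, 0, 0, False)
--     return best
-- ===== Notes on version B (the rewrite author's own statement) =====
-- stated objective: faster
-- what changed: Replaces the per-bitmask loop that recomputes hungry/deliciousness sums and the remaining-materials list from scratch for each of the 2^n masks by a DFS over the recipe list that maintains those three quantities incrementally along the recursion, so the inner O(n*m) rebuild per subset disappears.
-- outside the precondition, e.g. on perfectMenu([], [[1]], [[1, 1]], 5): A returns -1, B returns -1; on perfectMenu([1], [[]], [[1, 1]], 5): A returns -1, B returns -1
import Mathlib
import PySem

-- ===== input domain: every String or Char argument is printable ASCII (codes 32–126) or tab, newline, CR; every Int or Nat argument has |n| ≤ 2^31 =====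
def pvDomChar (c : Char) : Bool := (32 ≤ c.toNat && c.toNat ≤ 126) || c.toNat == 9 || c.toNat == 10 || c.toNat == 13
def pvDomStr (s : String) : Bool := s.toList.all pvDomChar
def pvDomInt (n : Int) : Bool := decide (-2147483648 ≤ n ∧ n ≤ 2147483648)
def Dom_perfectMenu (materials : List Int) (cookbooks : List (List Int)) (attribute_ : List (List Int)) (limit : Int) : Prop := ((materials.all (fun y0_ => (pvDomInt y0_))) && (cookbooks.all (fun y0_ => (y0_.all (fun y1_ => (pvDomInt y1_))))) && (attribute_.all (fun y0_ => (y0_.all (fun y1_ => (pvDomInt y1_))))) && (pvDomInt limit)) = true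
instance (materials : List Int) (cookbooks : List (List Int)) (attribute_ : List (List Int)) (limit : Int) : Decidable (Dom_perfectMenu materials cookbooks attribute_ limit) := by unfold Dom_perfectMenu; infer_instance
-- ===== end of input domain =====

-- B replaces A's per-bitmask recomputation (O(2^n·n·m)) by a DFS over the recipe list that
-- maintains the remaining materials and the two sums incrementally (objective: faster).


-- ===== PORT A =====
-- [x - y for x, y in zip(s, c)]  (zip truncates to the shorter list, exactly as in Python)
def pvZipSub (s c : List Int) : List Int := (s.zip c).map (fun p => p.1 - p.2)

def perfectMenu (materials : List Int) (cookbooks : List (List Int)) (attribute_ : List (List Int)) (limit : Int) : Int :=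
  let n := cookbooks.length
  -- range(1, 1 << n) ported as the Nat list range' 1 (2^n - 1); exact, every Python value is nonnegative
  (List.range' 1 (2 ^ n - 1)).foldl
    (fun target i =>
      let st := (List.range n).foldl
        (fun (st : Int × Int × List Int) j =>
          if i &&& (1 <<< j) ≠ 0 then
            (st.1 + (attribute_.getD j []).getD 1 0,      -- attribute[j][1]; in range under Pre_
             st.2.1 + (attribute_.getD j []).getD 0 0,    -- attribute[j][0]
             pvZipSub st.2.2 (cookbooks.getD j []))
          else st)
        ((0 : Int), (0 : Int), materials)
      -- min(s) ported via PySem.List.min?; Pre_ guarantees s nonempty, so getD never fires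
      if st.1 ≥ limit ∧ 0 ≤ (PySem.List.min? st.2.2 (fun x => x)).getD (-1) then max st.2.1 target
      else target)
    (-1)

-- ===== PORT B =====
-- dfs(items, s, hungry, delicious, chosen) with the nonlocal 'best' threaded as an accumulator
def pvDfs (limit : Int) : List (List Int × List Int) → List Int → Int → Int → Bool → Int → Int
  | [], s, hungry, delicious, chosen, best =>
      if chosen = true ∧ hungry ≥ limit ∧ 0 ≤ (PySem.List.min? s (fun x => x)).getD (-1) then
        max best delicious
      else best
  | (cb, at_) :: rest, s, hungry, delicious, chosen, best =>
      let best1 := pvDfs limit rest s hungry delicious chosen best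
      pvDfs limit rest (pvZipSub s cb) (hungry + at_.getD 1 0) (delicious + at_.getD 0 0) true best1

def perfectMenu_alt (materials : List Int) (cookbooks : List (List Int)) (attribute_ : List (List Int)) (limit : Int) : Int :=
  pvDfs limit (cookbooks.zip attribute_) materials 0 0 false (-1)

-- ===== PRECONDITION & SPEC =====
-- Pre_ excludes exactly the shapes on which the Python A can raise: with at least one cookbook,
-- a missing/short attribute row (IndexError on attribute[j][1]) and — conservatively — empty
-- materials or an empty cookbook row (ValueError from min([]) whenever some qualifying subset is
-- reached; on the inputs of that shape where no subset qualifies A still returns -1, see cites).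
def Pre_perfectMenu (materials : List Int) (cookbooks : List (List Int)) (attribute_ : List (List Int)) (limit : Int) : Prop :=
  cookbooks = [] ∨
    (cookbooks.length ≤ attribute_.length ∧
     (∀ a ∈ attribute_.take cookbooks.length, 2 ≤ a.length) ∧
     materials ≠ [] ∧ (∀ c ∈ cookbooks, c ≠ []))
instance (materials : List Int) (cookbooks : List (List Int)) (attribute_ : List (List Int)) (limit : Int) : Decidable (Pre_perfectMenu materials cookbooks attribute_ limit) := by unfold Pre_perfectMenu; infer_instance

def pvWitness_perfectMenu : List Int × List (List Int) × List (List Int) × Int :=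
  ([3, 2], [[1, 1], [1, 2]], [[3, 2], [2, 4]], 1)

def Spec_perfectMenu (materials : List Int) (cookbooks : List (List Int)) (attribute_ : List (List Int)) (limit : Int) (out : Int) : Prop := out = perfectMenu_alt materials cookbooks attribute_ limit
instance (materials : List Int) (cookbooks : List (List Int)) (attribute_ : List (List Int)) (limit : Int) (out : Int) : Decidable (Spec_perfectMenu materials cookbooks attribute_ limit out) := by unfold Spec_perfectMenu; infer_instance

-- ===== CLAIM (what is proved, stated in full; the proofs are below) =====
def Claim_equal_perfectMenu : Prop := ∀ (materials : List Int) (cookbooks : List (List Int)) (attribute_ : List (List Int)) (limit : Int), Dom_perfectMenu materials cookbooks attribute_ limit → Pre_perfectMenu materials cookbooks attribute_ limit → Spec_perfectMenu materials cookbooks attribute_ limit (perfectMenu materials cookbooks attribute_ limit)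

-- ===== LEMMAS AND PROOFS =====

-- the effect of including recipe x on the state (hungry, delicious, s)
def pvStep (x : List Int × List Int) (st : Int × Int × List Int) : Int × Int × List Int :=
  (st.1 + x.2.getD 1 0, st.2.1 + x.2.getD 0 0, pvZipSub st.2.2 x.1)

-- A's inner loop, re-expressed: apply to st the items whose bit is set in m (low bit = head)
def pvApplyMask : List (List Int × List Int) → Nat → (Int × Int × List Int) → Int × Int × List Int
  | [], _, st => st
  | x :: rest, m, st => pvApplyMask rest (m / 2) (if m % 2 = 1 then pvStep x st else st)

-- the candidate deliciousness contributed by mask m (none if the subset does not qualify)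
def pvF (limit : Int) (items : List (List Int × List Int)) (s0 : List Int) (h0 d0 : Int) (c : Bool) (m : Nat) : Option Int :=
  let st := pvApplyMask items m (h0, d0, s0)
  if (c = true ∨ m ≠ 0) ∧ st.1 ≥ limit ∧ 0 ≤ (PySem.List.min? st.2.2 (fun x => x)).getD (-1) then
    some st.2.1
  else none

-- the list of qualifying deliciousness values, in B's (DFS) order
def pvCands (limit : Int) : List (List Int × List Int) → List Int → Int → Int → Bool → List Int
  | [], s, h, d, c =>
      if c = true ∧ h ≥ limit ∧ 0 ≤ (PySem.List.min? s (fun x => x)).getD (-1) then [d] else []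
  | x :: rest, s, h, d, c =>
      pvCands limit rest s h d c ++
        pvCands limit rest (pvZipSub s x.1) (h + x.2.getD 1 0) (d + x.2.getD 0 0) true

theorem pvApplyMask_zero (items : List (List Int × List Int)) (st : Int × Int × List Int) :
    pvApplyMask items 0 st = st := by
  induction items generalizing st with
  | nil => rfl
  | cons x rest ih => simp [pvApplyMask, ih]

theorem pvDfs_eq_foldl (limit : Int) (items : List (List Int × List Int)) :
    ∀ (s : List Int) (h d : Int) (c : Bool) (best : Int),
      pvDfs limit items s h d c best = (pvCands limit items s h d c).foldl (fun t v => max t v) best := by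
  induction items with
  | nil =>
      intro s h d c best
      by_cases hc : c = true ∧ h ≥ limit ∧ 0 ≤ (PySem.List.min? s (fun x => x)).getD (-1) <;>
        simp [pvDfs, pvCands, hc]
  | cons x rest ih =>
      intro s h d c best
      obtain ⟨cb, at_⟩ := x
      simp [pvDfs, pvCands, List.foldl_append, ih]

theorem pvRange_double (k : Nat) :
    List.range (2 * k) = (List.range k).flatMap (fun t => [2 * t, 2 * t + 1]) := by
  induction k with
  | zero => rfl
  | succ k ih =>
      have h1 : 2 * (k + 1) = (2 * k + 1) + 1 := by ring
      rw [h1, List.range_succ, List.range_succ, List.range_succ, ih]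
      simp

theorem pvInterleave_perm {α β : Type} (a b : α → Option β) (l : List α) :
    (l.flatMap (fun t => (a t).toList ++ (b t).toList)).Perm (l.filterMap a ++ l.filterMap b) := by
  induction l with
  | nil => simp
  | cons x l ih =>
      simp only [List.flatMap_cons, List.filterMap_cons]
      cases ha : a x <;> cases hb : b x <;> simp only [Option.toList_some, Option.toList_none,
        List.nil_append, List.append_nil, List.cons_append]
      · exact ih
      · exact (ih.cons _).trans List.perm_middle.symm
      · exact ih.cons _
      · exact (((ih.cons _).trans List.perm_middle.symm).cons _)

theorem pvFilterMap_pair {α β : Type} (f : α → Option β) (x y : α) :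
    List.filterMap f [x, y] = (f x).toList ++ (f y).toList := by
  cases hx : f x <;> cases hy : f y <;> simp [hx, hy]

theorem pvApplyMask_even (x : List Int × List Int) (rest : List (List Int × List Int))
    (t : Nat) (st : Int × Int × List Int) :
    pvApplyMask (x :: rest) (2 * t) st = pvApplyMask rest t st := by
  show pvApplyMask rest ((2 * t) / 2) (if (2 * t) % 2 = 1 then pvStep x st else st) = _
  have h2 : (2 * t) / 2 = t := by omega
  rw [if_neg (by omega), h2]

theorem pvApplyMask_odd (x : List Int × List Int) (rest : List (List Int × List Int))
    (t : Nat) (st : Int × Int × List Int) :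
    pvApplyMask (x :: rest) (2 * t + 1) st = pvApplyMask rest t (pvStep x st) := by
  show pvApplyMask rest ((2 * t + 1) / 2) (if (2 * t + 1) % 2 = 1 then pvStep x st else st) = _
  have h2 : (2 * t + 1) / 2 = t := by omega
  rw [if_pos (by omega), h2]

theorem pvF_even (limit : Int) (x : List Int × List Int) (rest : List (List Int × List Int))
    (s : List Int) (h d : Int) (c : Bool) (t : Nat) :
    pvF limit (x :: rest) s h d c (2 * t) = pvF limit rest s h d c t := by
  have hcond : (c = true ∨ 2 * t ≠ 0) ↔ (c = true ∨ t ≠ 0) := by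
    constructor <;> rintro (h1 | h1) <;> first | exact Or.inl h1 | exact Or.inr (by omega)
  simp only [pvF, pvApplyMask_even]
  exact if_congr (and_congr_left' hcond) rfl rfl

theorem pvF_odd (limit : Int) (x : List Int × List Int) (rest : List (List Int × List Int))
    (s : List Int) (h d : Int) (c : Bool) (t : Nat) :
    pvF limit (x :: rest) s h d c (2 * t + 1) =
      pvF limit rest (pvZipSub s x.1) (h + x.2.getD 1 0) (d + x.2.getD 0 0) true t := by
  have hcond : (c = true ∨ 2 * t + 1 ≠ 0) ↔ (True ∨ t ≠ 0) :=
    iff_of_true (Or.inr (by omega)) (Or.inl trivial)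
  simp only [pvF, pvApplyMask_odd, pvStep]
  exact if_congr (and_congr_left' hcond) rfl rfl

theorem pvCands_perm (limit : Int) (items : List (List Int × List Int)) :
    ∀ (s : List Int) (h d : Int) (c : Bool),
      (pvCands limit items s h d c).Perm
        ((List.range (2 ^ items.length)).filterMap (pvF limit items s h d c)) := by
  induction items with
  | nil =>
      intro s h d c
      have : List.range (2 ^ 0) = [0] := rfl
      simp only [List.length_nil, this, pvCands]
      have h0 : pvF limit [] s h d c 0 =
          (if c = true ∧ h ≥ limit ∧ 0 ≤ (PySem.List.min? s (fun x => x)).getD (-1) then some d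
           else none) := by
        simp only [pvF, pvApplyMask]
        by_cases hc : c = true ∧ h ≥ limit ∧ 0 ≤ (PySem.List.min? s (fun x => x)).getD (-1)
        · rw [if_pos ⟨Or.inl hc.1, hc.2⟩, if_pos hc]
        · rw [if_neg, if_neg hc]
          rintro ⟨h1 | h1, h2⟩
          · exact hc ⟨h1, h2⟩
          · exact h1 rfl
      rw [List.filterMap_cons, h0]
      by_cases hc : c = true ∧ h ≥ limit ∧ 0 ≤ (PySem.List.min? s (fun x => x)).getD (-1) <;>
        simp [hc]
  | cons x rest ih =>
      intro s h d c
      have hlen : 2 ^ (x :: rest).length = 2 * 2 ^ rest.length := by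
        simp [List.length_cons, pow_succ]; ring
      rw [hlen, pvRange_double, List.filterMap_flatMap]
      have heq : ∀ t : Nat,
          List.filterMap (pvF limit (x :: rest) s h d c) [2 * t, 2 * t + 1] =
            ((pvF limit rest s h d c) t).toList ++
              ((pvF limit rest (pvZipSub s x.1) (h + x.2.getD 1 0) (d + x.2.getD 0 0) true) t).toList := by
        intro t
        rw [pvFilterMap_pair, pvF_even, pvF_odd]
      rw [List.flatMap_congr (fun t _ => heq t)]
      refine List.Perm.trans ?_ (pvInterleave_perm _ _ _).symm
      exact (ih s h d c).append (ih (pvZipSub s x.1) (h + x.2.getD 1 0) (d + x.2.getD 0 0) true)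

-- bridge: A's inner fold over range n with bit tests = pvApplyMask on the zipped items
theorem pvInner_eq (items : List (List Int × List Int)) :
    ∀ (m : Nat) (st : Int × Int × List Int),
      (List.range items.length).foldl
        (fun st j => if m &&& (1 <<< j) ≠ 0 then pvStep (items.getD j ([], [])) st else st) st
      = pvApplyMask items m st := by
  induction items with
  | nil => intro m st; rfl
  | cons x rest ih =>
      intro m st
      rw [List.length_cons, List.range_succ_eq_map, List.foldl_cons, List.foldl_map]
      have hbit0 : (m &&& (1 <<< 0) ≠ 0) ↔ m % 2 = 1 := by
        rw [Nat.shiftLeft_eq, pow_zero, mul_one, Nat.and_one_is_mod]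
        omega
      have hstep : ∀ (st' : Int × Int × List Int) (j : Nat),
          (if m &&& (1 <<< (j.succ)) ≠ 0 then pvStep ((x :: rest).getD (j.succ) ([], [])) st' else st')
            = (if (m / 2) &&& (1 <<< j) ≠ 0 then pvStep (rest.getD j ([], [])) st' else st') := by
        intro st' j
        have : (m &&& (1 <<< (j + 1)) ≠ 0) ↔ ((m / 2) &&& (1 <<< j) ≠ 0) := by
          rw [Nat.shiftLeft_eq, Nat.shiftLeft_eq, one_mul, one_mul]
          rw [Nat.and_two_pow, Nat.and_two_pow]
          rw [← Nat.testBit_succ]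
          rcases Bool.eq_false_or_eq_true (m.testBit (j + 1)) with hb | hb <;> simp [hb]
        rw [if_congr this rfl rfl]
        simp [List.getD]
      have h0 : (if m &&& (1 <<< 0) ≠ 0 then pvStep ((x :: rest).getD 0 ([], [])) st else st)
          = (if m % 2 = 1 then pvStep x st else st) := by
        rw [if_congr hbit0 rfl rfl]; simp [List.getD]
      rw [h0]
      have hfun : (fun (st' : Int × Int × List Int) (j : Nat) =>
            if m &&& (1 <<< (Nat.succ j)) ≠ 0 then pvStep ((x :: rest).getD (Nat.succ j) ([], [])) st' else st')
          = (fun (st' : Int × Int × List Int) (j : Nat) =>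
            if (m / 2) &&& (1 <<< j) ≠ 0 then pvStep (rest.getD j ([], [])) st' else st') := by
        funext st' j; exact hstep st' j
      rw [hfun, ih (m / 2) (if m % 2 = 1 then pvStep x st else st)]
      rfl

-- getD on the zip agrees with the componentwise getD for j < len cookbooks ≤ len attribute_
theorem pvZip_getD (cookbooks : List (List Int)) :
    ∀ (attribute_ : List (List Int)) (j : Nat), j < cookbooks.length →
      cookbooks.length ≤ attribute_.length →
      (cookbooks.zip attribute_).getD j ([], []) = (cookbooks.getD j [], attribute_.getD j []) := by
  induction cookbooks with
  | nil => intro attribute_ j hj _; simp at hj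
  | cons cb cbs ih =>
      intro attribute_ j hj hle
      cases attribute_ with
      | nil => simp at hle
      | cons a as =>
          cases j with
          | zero => simp [List.getD]
          | succ j =>
              have := ih as j (by simpa using hj) (by simpa using hle)
              simpa [List.getD] using this

-- a guarded running-max fold equals folding max over the filterMap of its candidates
theorem pvFoldl_guard (f : Nat → Option Int) :
    ∀ (l : List Nat) (b : Int),
      l.foldl (fun t i => match f i with | some v => max v t | none => t) b
        = (l.filterMap f).foldl (fun t v => max v t) b := by
  intro l
  induction l with
  | nil => intro b; rfl
  | cons x l ih =>
      intro b
      cases hx : f x <;> simp [hx, ih]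

theorem pvFoldl_congr_mem {α β : Type} (l : List α) (f g : β → α → β)
    (h : ∀ b a, a ∈ l → f b a = g b a) : ∀ b, l.foldl f b = l.foldl g b := by
  induction l with
  | nil => intro b; rfl
  | cons x l ih =>
      intro b
      rw [List.foldl_cons, List.foldl_cons, h b x (List.mem_cons_self),
        ih (fun b a ha => h b a (List.mem_cons_of_mem _ ha))]

-- ===== VERDICT (by name: the statement is the Claim_ definition above) =====
theorem perfectMenu_spec : Claim_equal_perfectMenu := by
  intro materials cookbooks attribute_ limit _ hpre
  show perfectMenu materials cookbooks attribute_ limit = perfectMenu_alt materials cookbooks attribute_ limit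
  rcases hpre with hnil | ⟨hle, _, _, _⟩
  · subst hnil
    simp [perfectMenu, perfectMenu_alt, pvDfs]
  · -- main case
    set items : List (List Int × List Int) := cookbooks.zip attribute_ with hitems
    have hn : items.length = cookbooks.length := by
      rw [hitems, List.length_zip]; omega
    -- A's inner loop equals pvApplyMask on the zipped items
    have hinner : ∀ i : Nat,
        (List.range cookbooks.length).foldl
          (fun (st : Int × Int × List Int) j =>
            if i &&& (1 <<< j) ≠ 0 then
              (st.1 + (attribute_.getD j []).getD 1 0,
               st.2.1 + (attribute_.getD j []).getD 0 0,
               pvZipSub st.2.2 (cookbooks.getD j []))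
            else st)
          ((0 : Int), (0 : Int), materials)
        = pvApplyMask items i ((0 : Int), (0 : Int), materials) := by
      intro i
      rw [← pvInner_eq items i ((0 : Int), (0 : Int), materials), ← hn]
      apply pvFoldl_congr_mem
      intro st j hj
      have hj' : j < cookbooks.length := by
        rw [← hn]; exact List.mem_range.mp hj
      rw [hitems, pvZip_getD cookbooks attribute_ j hj' hle]
      rfl
    -- A's outer loop as a guarded running max over pvF
    have hA : perfectMenu materials cookbooks attribute_ limit
        = (List.range' 1 (2 ^ cookbooks.length - 1)).foldl
            (fun t i => match pvF limit items materials 0 0 false i with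
              | some v => max v t
              | none => t) (-1) := by
      unfold perfectMenu
      apply pvFoldl_congr_mem
      intro t i hi
      have hi1 : i ≠ 0 := by
        have := (List.mem_range'_1.mp hi).1
        omega
      rw [hinner i]
      simp only [pvF]
      by_cases hc : (pvApplyMask items i (0, 0, materials)).1 ≥ limit ∧
          0 ≤ (PySem.List.min? (pvApplyMask items i (0, 0, materials)).2.2 (fun x => x)).getD (-1)
      · rw [if_pos hc, if_pos ⟨Or.inr hi1, hc⟩]
      · rw [if_neg hc, if_neg (by rintro ⟨_, h2⟩; exact hc h2)]
    -- extend the index list with mask 0 (pvF yields none there)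
    have hzero : pvF limit items materials 0 0 false 0 = none := by
      simp only [pvF, pvApplyMask_zero]
      rw [if_neg]
      rintro ⟨h1 | h1, _⟩
      · exact Bool.false_ne_true h1
      · exact h1 rfl
    have hrange : List.range (2 ^ cookbooks.length) = 0 :: List.range' 1 (2 ^ cookbooks.length - 1) := by
      have h1 : 2 ^ cookbooks.length = (2 ^ cookbooks.length - 1) + 1 := by
        have := Nat.one_le_two_pow (n := cookbooks.length)
        omega
      rw [List.range_eq_range', h1, List.range'_succ]
      simp
    have hfoldmax : ((List.range (2 ^ cookbooks.length)).filterMap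
          (pvF limit items materials 0 0 false)).foldl (fun t v => max v t) (-1)
        = perfectMenu materials cookbooks attribute_ limit := by
      rw [hrange, List.filterMap_cons, hzero, hA, pvFoldl_guard]
    -- B's side
    have hB : perfectMenu_alt materials cookbooks attribute_ limit
        = (pvCands limit items materials 0 0 false).foldl (fun t v => max v t) (-1) := by
      unfold perfectMenu_alt
      rw [← hitems, pvDfs_eq_foldl]
      apply pvFoldl_congr_mem
      intro b a _
      exact max_comm b a
    -- permutation between the two candidate lists
    have hperm := pvCands_perm limit items materials 0 0 false
    rw [hn] at hperm
    have hcomm : ∀ x ∈ pvCands limit items materials 0 0 false,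
        ∀ y ∈ pvCands limit items materials 0 0 false, ∀ z : Int,
          max y (max x z) = max x (max y z) := by
      intro x _ y _ z
      rw [max_left_comm]
    rw [hB, ← hfoldmax]
    exact (List.Perm.foldl_eq' hperm hcomm (-1)).symm
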